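-- pv_equiv track=rewrite | github.com/elementalsouls/Recon-Rat | crt-sh.py | _find_identities_column
-- ===== SOURCE A (Python) =====
-- from typing import Set, Optional
--
-- def _find_identities_column(headers: list) -> Optional[int]:
--     """Find the column index containing certificate identities."""
--     # Primary keywords for matching identities column
--     primary_keywords = ['matching identities', 'common name', 'identity']
--
--     for i, header in enumerate(headers):
--         header_lower = header.lower()
--         if any(keyword in header_lower for keyword in primary_keywords):
--             return i
--
--     # Fallback keywords
--     fallback_keywords = ['name', 'domain', 'subject', 'cn']
--     for i, header in enumerate(headers):
--         header_lower = header.lower()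
--         if any(keyword in header_lower for keyword in fallback_keywords):
--             return i
--
--     return None
-- ===== SOURCE B (Python) =====
-- from typing import Optional
--
-- def _find_identities_column(headers: list) -> Optional[int]:
--     """Single pass: return on a primary match; remember the first fallback match."""
--     primary_keywords = ['matching identities', 'common name', 'identity']
--     fallback_keywords = ['name', 'domain', 'subject', 'cn']
--     first_fallback = None
--     for i, header in enumerate(headers):
--         header_lower = header.lower()
--         if any(k in header_lower for k in primary_keywords):
--             return i
--         if first_fallback is None and any(k in header_lower for k in fallback_keywords):
--             first_fallback = i
--     return first_fallback
-- ===== Notes on version B (the rewrite author's own statement) =====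
-- stated objective: alternative
-- what changed: Replaced A's two sequential scans of the header list by a single pass that returns immediately on a primary-keyword match and carries the first fallback-keyword match as accumulator state, returned after the loop.
import Mathlib
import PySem

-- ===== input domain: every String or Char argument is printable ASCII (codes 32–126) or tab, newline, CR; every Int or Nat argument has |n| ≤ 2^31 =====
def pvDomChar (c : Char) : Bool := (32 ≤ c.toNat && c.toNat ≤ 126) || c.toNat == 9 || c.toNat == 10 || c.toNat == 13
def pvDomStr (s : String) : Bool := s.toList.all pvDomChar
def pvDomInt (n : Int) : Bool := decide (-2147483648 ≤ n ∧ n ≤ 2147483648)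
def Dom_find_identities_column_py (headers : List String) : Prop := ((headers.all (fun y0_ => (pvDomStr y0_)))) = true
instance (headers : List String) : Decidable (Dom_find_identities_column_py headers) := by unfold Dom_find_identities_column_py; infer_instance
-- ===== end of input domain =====

-- B merges A's two scans into one pass that returns on a primary match and carries the first fallback match as state (alternative decomposition, same cost).
-- ===== PORT A =====
def pvPrimaryKeywords : List String := ["matching identities", "common name", "identity"]
def pvFallbackKeywords : List String := ["name", "domain", "subject", "cn"]

-- first loop of A: first index whose lowercased header contains a primary keyword
def pvScanA (kws : List String) : List String → Int → Option Int
  | [], _ => none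
  | h :: t, i =>
    let header_lower := PySem.Str.lower h
    if kws.any (fun kw => PySem.Str.isIn kw header_lower) then some i
    else pvScanA kws t (i + 1)

def find_identities_column_py (headers : List String) : Option Int :=
  match pvScanA pvPrimaryKeywords headers 0 with
  | some i => some i
  | none => pvScanA pvFallbackKeywords headers 0

-- ===== PORT B =====
def pvLoopB : List String → Int → Option Int → Option Int
  | [], _, first_fallback => first_fallback
  | h :: t, i, first_fallback =>
    let header_lower := PySem.Str.lower h
    if pvPrimaryKeywords.any (fun kw => PySem.Str.isIn kw header_lower) then some i
    else
      pvLoopB t (i + 1)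
        (if first_fallback = none ∧
            pvFallbackKeywords.any (fun kw => PySem.Str.isIn kw header_lower) = true
         then some i else first_fallback)

def find_identities_column_py_alt (headers : List String) : Option Int :=
  pvLoopB headers 0 none

-- ===== PRECONDITION & SPEC =====
def Spec_find_identities_column_py (headers : List String) (out : Option Int) : Prop := out = find_identities_column_py_alt headers
instance (headers : List String) (out : Option Int) : Decidable (Spec_find_identities_column_py headers out) := by unfold Spec_find_identities_column_py; infer_instance

-- ===== CLAIM (what is proved, stated in full; the proofs are below) =====
def Claim_equal_find_identities_column_py : Prop := ∀ (headers : List String), Dom_find_identities_column_py headers → Spec_find_identities_column_py headers (find_identities_column_py headers)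

-- ===== LEMMAS AND PROOFS =====

theorem pvLoopB_eq (hs : List String) : ∀ (i : Int) (fb : Option Int),
    pvLoopB hs i fb =
      match pvScanA pvPrimaryKeywords hs i with
      | some j => some j
      | none => match fb with
        | some f => some f
        | none => pvScanA pvFallbackKeywords hs i := by
  induction hs with
  | nil => intro i fb; cases fb <;> rfl
  | cons h t ih =>
    intro i fb
    simp only [pvLoopB, pvScanA]
    cases hp : (pvPrimaryKeywords.any fun kw => PySem.Str.isIn kw (PySem.Str.lower h)) with
    | true => simp
    | false =>
      simp only [Bool.false_eq_true, if_false, ih]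
      cases fb with
      | some f => simp
      | none =>
        cases hf : (pvFallbackKeywords.any fun kw => PySem.Str.isIn kw (PySem.Str.lower h)) with
        | true => cases pvScanA pvPrimaryKeywords t (i + 1) <;> simp
        | false => cases pvScanA pvPrimaryKeywords t (i + 1) <;> simp

-- ===== VERDICT (by name: the statement is the Claim_ definition above) =====
theorem find_identities_column_py_spec : Claim_equal_find_identities_column_py := by
  intro headers _
  unfold Spec_find_identities_column_py find_identities_column_py find_identities_column_py_alt
  rw [pvLoopB_eq]
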